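-- pv_equiv track=rewrite | github.com/gpena208777/HashWatcherHubPi | hashwatcher_hub_agent.py | _parse_led_trigger
-- ===== SOURCE A (Python) =====
-- from typing import Any, Dict, Iterable, List, Optional
--
-- def _parse_led_trigger(raw: Optional[str]) -> tuple[Optional[str], List[str]]:
--     if not raw:
--         return None, []
--     available: List[str] = []
--     current: Optional[str] = None
--     for part in raw.split():
--         token = part.strip()
--         if not token:
--             continue
--         if token.startswith("[") and token.endswith("]"):
--             token = token[1:-1]
--             current = token
--         available.append(token)
--     return current, available
-- ===== SOURCE B (Python) =====
-- from typing import List, Optional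
--
-- def _parse_led_trigger(raw: Optional[str]) -> tuple[Optional[str], List[str]]:
--     if not raw:
--         return None, []
--     current: Optional[str] = None
--     available: List[str] = []
--     buf: List[str] = []
--
--     def flush() -> None:
--         nonlocal current
--         if not buf:
--             return
--         tok = "".join(buf)
--         if tok[0] == "[" and tok[-1] == "]":
--             tok = tok[1:-1]
--             current = tok
--         available.append(tok)
--         buf.clear()
--
--     for ch in raw:
--         if ch.isspace():
--             flush()
--         else:
--             buf.append(ch)
--     flush()
--     return current, available
-- ===== Notes on version B (the rewrite author's own statement) =====
-- stated objective: alternative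
-- what changed: A tokenizes with str.split() and then runs a token-level accumulating loop; B never calls split(): it is a single character-level scanner that builds each word in a buffer and classifies/flushes it at every whitespace boundary, updating current/available as part of the flush.
import Mathlib
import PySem

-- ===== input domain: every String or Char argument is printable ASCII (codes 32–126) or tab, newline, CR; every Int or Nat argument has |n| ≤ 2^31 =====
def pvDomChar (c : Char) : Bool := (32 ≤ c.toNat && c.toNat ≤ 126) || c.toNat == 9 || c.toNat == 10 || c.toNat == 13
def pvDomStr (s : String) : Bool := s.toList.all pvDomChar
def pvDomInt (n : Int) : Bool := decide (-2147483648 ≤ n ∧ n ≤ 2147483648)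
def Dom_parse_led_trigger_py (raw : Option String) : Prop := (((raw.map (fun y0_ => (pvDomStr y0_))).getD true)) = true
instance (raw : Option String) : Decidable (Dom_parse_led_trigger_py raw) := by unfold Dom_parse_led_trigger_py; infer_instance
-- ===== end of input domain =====

-- B replaces A's split()-then-token-loop by a single character-level scanner that builds each
-- word in a buffer and classifies/flushes it at whitespace boundaries (objective: alternative).

-- ===== PORT A =====
def parse_led_trigger_py (raw : Option String) : Option String × List String :=
  match raw with
  | none => (none, [])
  | some s =>
    if s = "" then (none, [])
    else
      (PySem.Str.split₀ s).foldl
        (fun (st : Option String × List String) part =>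
          let token := PySem.Str.strip part
          if token = "" then st
          else if PySem.Str.startswith token "[" && PySem.Str.endswith token "]" then
            let token2 := PySem.Str.slice token (some 1) (some (-1))
            (some token2, st.2 ++ [token2])
          else (st.1, st.2 ++ [token]))
        (none, [])

-- ===== PORT B =====
-- B's flush(): if the buffer holds a word, classify it (tok[0]=='[' and tok[-1]==']') and emit
def pvFlushB (buf : List Char) (cur : Option String) (av : List String) :
    Option String × List String :=
  if buf.isEmpty then (cur, av)
  else
    let tok := String.ofList buf
    if PySem.Str.pyGet? tok 0 = some '[' ∧ PySem.Str.pyGet? tok (-1) = some ']' then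
      let tok2 := PySem.Str.slice tok (some 1) (some (-1))
      (some tok2, av ++ [tok2])
    else (cur, av ++ [tok])

-- B's character loop: accumulate non-space chars, flush at whitespace, final flush at the end
def pvScanB : List Char → List Char → Option String → List String → Option String × List String
  | [], buf, cur, av => pvFlushB buf cur av
  | c :: rest, buf, cur, av =>
    if PySem.Chars.isspace c then
      let st := pvFlushB buf cur av
      pvScanB rest [] st.1 st.2
    else pvScanB rest (buf ++ [c]) cur av

def parse_led_trigger_py_alt (raw : Option String) : Option String × List String :=
  match raw with
  | none => (none, [])
  | some s =>
    if s = "" then (none, [])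
    else pvScanB s.toList [] none []

-- ===== PRECONDITION & SPEC =====
def Spec_parse_led_trigger_py (raw : Option String) (out : Option String × List String) : Prop := out = parse_led_trigger_py_alt raw
instance (raw : Option String) (out : Option String × List String) : Decidable (Spec_parse_led_trigger_py raw out) := by unfold Spec_parse_led_trigger_py; infer_instance

-- ===== CLAIM (what is proved, stated in full; the proofs are below) =====
def Claim_equal_parse_led_trigger_py : Prop := ∀ (raw : Option String), Dom_parse_led_trigger_py raw → Spec_parse_led_trigger_py raw (parse_led_trigger_py raw)

-- ===== LEMMAS AND PROOFS =====

-- the common token step both folds reduce to (tokens already stripped and nonempty)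
def pvStepE (st : Option String × List String) (t : String) : Option String × List String :=
  if PySem.Str.startswith t "[" && PySem.Str.endswith t "]" then
    let t2 := PySem.Str.slice t (some 1) (some (-1))
    (some t2, st.2 ++ [t2])
  else (st.1, st.2 ++ [t])

-- every piece produced by split₀.go is nonempty and whitespace-free
theorem pv_go_tokens (s : List Char) : ∀ (cur : List Char) (acc : List (List Char)),
    (∀ c ∈ cur, PySem.Chars.isspace c = false) →
    (∀ a ∈ acc, a ≠ [] ∧ ∀ c ∈ a, PySem.Chars.isspace c = false) →
    ∀ t ∈ PySem.Chars.split₀.go s cur acc, t ≠ [] ∧ ∀ c ∈ t, PySem.Chars.isspace c = false := by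
  induction s with
  | nil =>
    intro cur acc hcur hacc t ht
    rw [PySem.Chars.split₀.go.eq_def] at ht
    by_cases h : cur.isEmpty = true
    · simp [h] at ht
      exact hacc t ht
    · simp [h] at ht
      rcases ht with h1 | h1
      · exact hacc t h1
      · subst h1
        refine ⟨by simpa [List.isEmpty_iff] using h, ?_⟩
        intro c hc; exact hcur c (List.mem_reverse.mp hc)
  | cons c rest ih =>
    intro cur acc hcur hacc t ht
    rw [PySem.Chars.split₀.go.eq_def] at ht
    by_cases hsp : PySem.Chars.isspace c = true
    · by_cases h : cur.isEmpty = true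
      · simp [hsp, h] at ht
        exact ih [] acc (by simp) hacc t ht
      · simp [hsp, h] at ht
        refine ih [] (cur.reverse :: acc) (by simp) ?_ t ht
        intro a ha
        rcases List.mem_cons.mp ha with ha | ha
        · subst ha
          refine ⟨by simpa [List.isEmpty_iff] using h, ?_⟩
          intro d hd; exact hcur d (List.mem_reverse.mp hd)
        · exact hacc a ha
    · simp [hsp] at ht
      refine ih (c :: cur) acc ?_ hacc t ht
      intro d hd
      rcases List.mem_cons.mp hd with hd | hd
      · subst hd; simpa using hsp
      · exact hcur d hd

theorem pv_dropWhile_eq_self {p : Char → Bool} {l : List Char}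
    (h : ∀ c ∈ l, p c = false) : l.dropWhile p = l := by
  cases l with
  | nil => rfl
  | cons x xs => simp [List.dropWhile, h x (by simp)]

-- each token of s.split() is already stripped and nonempty
theorem pv_str_tokens (s : String) :
    ∀ t ∈ PySem.Str.split₀ s, PySem.Str.strip t = t ∧ t ≠ "" := by
  intro t ht
  have hmem : t.toList ∈ PySem.Chars.split₀ s.toList := by
    rw [← PySem.Str.split₀_map_toList]
    exact List.mem_map_of_mem ht
  have hfacts := pv_go_tokens s.toList [] [] (by simp) (by simp) t.toList
    (by simpa [PySem.Chars.split₀] using hmem)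
  constructor
  · apply String.toList_inj.mp
    rw [PySem.Str.toList_strip]
    unfold PySem.Chars.strip PySem.Chars.rstrip PySem.Chars.lstrip
    rw [pv_dropWhile_eq_self hfacts.2,
        pv_dropWhile_eq_self (fun c hc => hfacts.2 c (List.mem_reverse.mp hc)),
        List.reverse_reverse]
  · intro h
    exact hfacts.1 (by simp [h])

-- A's fold over the split tokens is a fold of the common step
theorem pv_foldA_eq_foldE (tokens : List String)
    (ht : ∀ t ∈ tokens, PySem.Str.strip t = t ∧ t ≠ "") (init : Option String × List String) :
    tokens.foldl
      (fun (st : Option String × List String) part =>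
        let token := PySem.Str.strip part
        if token = "" then st
        else if PySem.Str.startswith token "[" && PySem.Str.endswith token "]" then
          let token2 := PySem.Str.slice token (some 1) (some (-1))
          (some token2, st.2 ++ [token2])
        else (st.1, st.2 ++ [token])) init
    = tokens.foldl pvStepE init := by
  apply PySem.List.foldl_congr_mem
  intro st t hmem
  have h := ht t hmem
  simp only [h.1, if_neg h.2, pvStepE]

-- B's index test equals A's startswith/endswith test on a nonempty word
theorem pv_bracket_iff (buf : List Char) :
    (PySem.Str.pyGet? (String.ofList buf) 0 = some '[' ∧
     PySem.Str.pyGet? (String.ofList buf) (-1) = some ']')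
    ↔ (PySem.Str.startswith (String.ofList buf) "[" &&
       PySem.Str.endswith (String.ofList buf) "]") = true := by
  have hpre : ['['] <+: buf ↔ buf[0]? = some '[' := by
    cases buf with
    | nil => simp
    | cons c cs => simp [List.cons_prefix_cons, eq_comm]
  have hsuf : [']'] <:+ buf ↔ buf.getLast? = some ']' := by
    rw [← List.reverse_prefix]
    cases hr : buf.reverse with
    | nil => simp [← List.head?_reverse, hr]
    | cons c cs => simp [hr, List.cons_prefix_cons, ← List.head?_reverse, eq_comm]
  rw [Bool.and_eq_true]
  simp only [PySem.Str.startswith_eq, PySem.Str.endswith_eq,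
    PySem.Chars.startswith_iff, PySem.Chars.endswith_iff,
    PySem.Str.pyGet?, PySem.Chars.pyGet?_eq_listPyGet?,
    PySem.List.pyGet?_zero, PySem.List.pyGet?_neg_one, String.toList_ofList]
  rw [show "[".toList = ['['] from rfl, show "]".toList = [']'] from rfl, hpre, hsuf]

-- flushing a nonempty buffer is the common step on the joined word
theorem pv_flush_eq (buf : List Char) (h : buf ≠ []) (cur : Option String) (av : List String) :
    pvFlushB buf cur av = pvStepE (cur, av) (String.ofList buf) := by
  unfold pvFlushB pvStepE
  rw [if_neg (by simpa [List.isEmpty_iff] using h)]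
  by_cases hb : (PySem.Str.pyGet? (String.ofList buf) 0 = some '[' ∧
      PySem.Str.pyGet? (String.ofList buf) (-1) = some ']')
  · rw [if_pos hb, if_pos ((pv_bracket_iff buf).mp hb)]
  · rw [if_neg hb, if_neg (fun hc => hb ((pv_bracket_iff buf).mpr hc))]

-- split₀.go's accumulator is a completed prefix of its result
theorem pv_go_acc (s : List Char) : ∀ (cur : List Char) (acc : List (List Char)),
    PySem.Chars.split₀.go s cur acc = acc.reverse ++ PySem.Chars.split₀.go s cur [] := by
  induction s with
  | nil =>
    intro cur acc
    rw [PySem.Chars.split₀.go.eq_def, PySem.Chars.split₀.go.eq_def]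
    by_cases h : cur.isEmpty = true <;> simp [h]
  | cons c rest ih =>
    intro cur acc
    rw [PySem.Chars.split₀.go.eq_def]
    conv_rhs => rw [PySem.Chars.split₀.go.eq_def]
    by_cases hsp : PySem.Chars.isspace c = true
    · by_cases h : cur.isEmpty = true
      · simp only [hsp, h, if_true]
        exact ih [] acc
      · simp only [hsp, h, if_true, if_false, Bool.false_eq_true]
        rw [ih [] (cur.reverse :: acc), ih [] [cur.reverse]]
        simp
    · simp only [hsp, Bool.false_eq_true, if_false]
      exact ih (c :: cur) acc

-- B's scanner equals the common-step fold over the tokens split() would produce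
theorem pv_scan_eq (s : List Char) : ∀ (buf : List Char) (cur : Option String) (av : List String),
    pvScanB s buf cur av
    = ((PySem.Chars.split₀.go s buf.reverse []).map String.ofList).foldl pvStepE (cur, av) := by
  induction s with
  | nil =>
    intro buf cur av
    rw [PySem.Chars.split₀.go.eq_def]
    cases buf with
    | nil => simp [pvScanB, pvFlushB]
    | cons c bs =>
      simp only [List.reverse_cons, List.isEmpty_iff, List.append_eq_nil_iff, List.reverse_append,
        List.reverse_reverse, List.reverse_cons, List.reverse_nil, List.nil_append]
      show pvScanB [] (c :: bs) cur av = _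
      rw [pvScanB, pv_flush_eq (c :: bs) (by simp)]
      simp
  | cons c rest ih =>
    intro buf cur av
    rw [PySem.Chars.split₀.go.eq_def]
    by_cases hsp : PySem.Chars.isspace c = true
    · cases buf with
      | nil =>
        simp only [hsp, if_true, List.reverse_nil, List.isEmpty_nil]
        rw [pvScanB]
        simp only [hsp, if_true]
        exact ih [] cur av
      | cons b bs =>
        have hne : ((b :: bs).reverse).isEmpty = false := by simp
        simp only [hsp, if_true, hne, Bool.false_eq_true, if_false, List.reverse_reverse]
        rw [pv_go_acc rest [] [(b :: bs)]]
        rw [pvScanB]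
        simp only [hsp, if_true]
        rw [ih [] _ _]
        simp only [List.reverse_nil, List.map_append, List.map_cons, List.map_nil,
          List.reverse_cons, List.nil_append, List.foldl_cons, List.foldl_append]
        rw [pv_flush_eq (b :: bs) (by simp)]
        rfl
    · have : PySem.Chars.isspace c = false := by simpa using hsp
      simp only [this, Bool.false_eq_true, if_false]
      rw [pvScanB]
      simp only [this, Bool.false_eq_true, if_false]
      rw [ih (buf ++ [c]) cur av]
      simp

-- the string-level token list is the char-level one joined back to strings
theorem pv_split_tokens (s : String) :
    PySem.Str.split₀ s = (PySem.Chars.split₀.go s.toList [] []).map String.ofList := by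
  have h := PySem.Str.split₀_map_toList s
  show PySem.Str.split₀ s = (PySem.Chars.split₀ s.toList).map String.ofList
  rw [← h, List.map_map,
    show (String.ofList ∘ String.toList) = id from funext fun t => by simp,
    List.map_id]

-- ===== VERDICT (by name: the statement is the Claim_ definition above) =====
theorem parse_led_trigger_py_spec : Claim_equal_parse_led_trigger_py := by
  intro raw _
  unfold Spec_parse_led_trigger_py
  cases raw with
  | none => rfl
  | some s =>
    by_cases hs : s = ""
    · simp [parse_led_trigger_py, parse_led_trigger_py_alt, hs]
    · simp only [parse_led_trigger_py, parse_led_trigger_py_alt, if_neg hs]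
      rw [pv_foldA_eq_foldE (PySem.Str.split₀ s) (pv_str_tokens s),
          pv_scan_eq s.toList [] none [], pv_split_tokens s]
      rfl
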